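-- pv_equiv track=rewrite | github.com/shivanik1105/CV_redaction | resume_redactor.py | _remove_large_duplicates
-- ===== SOURCE A (Python) =====
-- def _remove_large_duplicates(lines):
--     """Remove large duplicate consecutive blocks by finding exact repeating sequences"""
--     if len(lines) < 30:
--         return lines
--
--     # Convert to string with line numbers for easier matching
--     text_with_nums = '\n'.join(f"{i}:{line}" for i, line in enumerate(lines))
--
--     # Look for repeating blocks of at least 15 consecutive lines
--     min_block_size = 15
--     i = 0
--     to_remove = set()
--
--     while i < len(lines) - min_block_size:
--         # Get block starting at i
--         block = [l.strip() for l in lines[i:i+min_block_size]]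
--
--         # Look for this same block later in the text
--         for j in range(i + min_block_size, len(lines) - min_block_size + 1):
--             next_block = [l.strip() for l in lines[j:j+min_block_size]]
--
--             # Check for exact match
--             if block == next_block:
--                 # Found exact duplicate - mark entire duplicate section
--                 # Find where duplicate ends
--                 dup_len = min_block_size
--                 while (i + dup_len < len(lines) and j + dup_len < len(lines) and
--                        lines[i + dup_len].strip() == lines[j + dup_len].strip()):
--                     dup_len += 1
--
--                 # Mark duplicate for removal
--                 for k in range(j, min(j + dup_len, len(lines))):
--                     to_remove.add(k)
--
--                 break
--
--         i += 1
--
--     # Return lines without duplicates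
--     return [lines[idx] for idx in range(len(lines)) if idx not in to_remove]
-- ===== SOURCE B (Python) =====
-- def _remove_large_duplicates(lines):
--     """Remove large duplicate consecutive blocks via a hash index of stripped 15-line blocks."""
--     n = len(lines)
--     if n < 30:
--         return lines
--
--     B = 15
--     stripped = [l.strip() for l in lines]
--
--     # Index every position of each stripped 15-line block (positions stored in increasing order).
--     index = {}
--     for j in range(n - B + 1):
--         index.setdefault(tuple(stripped[j:j + B]), []).append(j)
--
--     to_remove = set()
--     for i in range(n - B):
--         occ = index.get(tuple(stripped[i:i + B]), [])
--         j = next((p for p in occ if p >= i + B), None)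
--         if j is not None:
--             dup_len = B
--             while i + dup_len < n and j + dup_len < n and stripped[i + dup_len] == stripped[j + dup_len]:
--                 dup_len += 1
--             to_remove.update(range(j, j + dup_len))
--
--     return [lines[idx] for idx in range(n) if idx not in to_remove]
-- ===== Notes on version B (the rewrite author's own statement) =====
-- stated objective: faster
-- what changed: B strips each line once and builds a dict mapping each stripped 15-line block (as a tuple) to its sorted list of positions, so the first matching later block is found by a single dict lookup plus a scan over true matches instead of A's linear rescan comparing freshly-stripped 15-line blocks at every later position.
import Mathlib
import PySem

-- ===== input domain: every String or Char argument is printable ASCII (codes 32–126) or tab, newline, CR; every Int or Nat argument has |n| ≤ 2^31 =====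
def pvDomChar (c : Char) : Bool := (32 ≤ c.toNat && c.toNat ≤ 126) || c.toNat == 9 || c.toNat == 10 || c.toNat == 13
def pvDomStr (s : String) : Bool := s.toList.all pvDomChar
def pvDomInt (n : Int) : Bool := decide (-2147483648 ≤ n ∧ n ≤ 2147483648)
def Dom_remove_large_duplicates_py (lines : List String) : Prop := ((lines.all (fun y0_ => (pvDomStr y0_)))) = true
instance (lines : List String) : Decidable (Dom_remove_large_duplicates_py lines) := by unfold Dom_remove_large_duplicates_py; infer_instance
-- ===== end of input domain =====

-- B replaces A's quadratic rescan for a matching later 15-line block by a dict indexing every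
-- stripped block's positions (strips computed once); same return value, measured faster.
-- A's 'text_with_nums' is dead code (never read) and is omitted from both ports.

-- ===== PORT A =====
-- block = [l.strip() for l in lines[i:i+15]]
def pvStripBlockA (lines : List String) (i : Nat) : List String :=
  (PySem.List.slice lines (some (i : Int)) (some ((i + 15 : Nat) : Int))).map PySem.Str.strip

-- the inner 'while … dup_len += 1' loop, returning the final dup_len
def pvExtendA (lines : List String) (n i j d : Nat) : Nat :=
  if h : i + d < n ∧ j + d < n ∧
      (PySem.Str.strip (lines.getD (i + d) "") == PySem.Str.strip (lines.getD (j + d) "")) then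
    pvExtendA lines n i j (d + 1)
  else d
termination_by n - d
decreasing_by omega

-- one iteration of the outer 'while i < len(lines) - 15' loop (i only ever increases by 1)
def pvStepA (lines : List String) (n : Nat) (acc : PySem.Set Nat) (i : Nat) : PySem.Set Nat :=
  let block := pvStripBlockA lines i
  match (List.range' (i + 15) (n - 14 - (i + 15))).find?
      (fun j => block == pvStripBlockA lines j) with
  | some j =>
      let dup := pvExtendA lines n i j 15
      (List.range' j (min (j + dup) n - j)).foldl (fun s k => PySem.Set.add s k) acc
  | none => acc

def remove_large_duplicates_py (lines : List String) : List String :=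
  let n := lines.length
  if n < 30 then lines
  else
    let to_remove := (List.range (n - 15)).foldl (pvStepA lines n) PySem.Set.empty
    ((List.range n).filter (fun idx => !(PySem.Set.contains to_remove idx))).map
      (fun idx => lines.getD idx "")

-- ===== PORT B =====
-- tuple(stripped[i:i+15])
def pvBlockB (stripped : List String) (i : Nat) : List String :=
  PySem.List.slice stripped (some (i : Int)) (some ((i + 15 : Nat) : Int))

-- B's extension loop over the precomputed stripped list
def pvExtendB (stripped : List String) (n i j d : Nat) : Nat :=
  if h : i + d < n ∧ j + d < n ∧ (stripped.getD (i + d) "" == stripped.getD (j + d) "") then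
    pvExtendB stripped n i j (d + 1)
  else d
termination_by n - d
decreasing_by omega

-- index.setdefault(tuple(stripped[j:j+15]), []).append(j) for j in range(n - 15 + 1)
def pvIndexB (stripped : List String) (n : Nat) : PySem.Dict (List String) (List Nat) :=
  ((List.range (n - 14)).map (fun j => (pvBlockB stripped j, j))).foldl
    (fun d p => d.modify p.1 [] (· ++ [p.2])) PySem.Dict.empty

-- one iteration of B's 'for i in range(n - 15)' loop
def pvStepB (stripped : List String) (idx : PySem.Dict (List String) (List Nat)) (n : Nat)
    (acc : PySem.Set Nat) (i : Nat) : PySem.Set Nat :=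
  let occ := idx.getD (pvBlockB stripped i) []
  match occ.find? (fun p => decide (i + 15 ≤ p)) with
  | some j =>
      let dup := pvExtendB stripped n i j 15
      PySem.Set.update acc (List.range' j dup)
  | none => acc

def remove_large_duplicates_py_alt (lines : List String) : List String :=
  let n := lines.length
  if n < 30 then lines
  else
    let stripped := lines.map PySem.Str.strip
    let idx := pvIndexB stripped n
    let to_remove := (List.range (n - 15)).foldl (pvStepB stripped idx n) PySem.Set.empty
    ((List.range n).filter (fun k => !(PySem.Set.contains to_remove k))).map
      (fun k => lines.getD k "")

-- ===== PRECONDITION & SPEC =====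
def Spec_remove_large_duplicates_py (lines : List String) (out : List String) : Prop := out = remove_large_duplicates_py_alt lines
instance (lines : List String) (out : List String) : Decidable (Spec_remove_large_duplicates_py lines out) := by unfold Spec_remove_large_duplicates_py; infer_instance

-- ===== CLAIM (what is proved, stated in full; the proofs are below) =====
def Claim_equal_remove_large_duplicates_py : Prop := ∀ (lines : List String), Dom_remove_large_duplicates_py lines → Spec_remove_large_duplicates_py lines (remove_large_duplicates_py lines)

-- ===== LEMMAS AND PROOFS =====

theorem pvBlock_eq (lines : List String) (i : Nat) :
    pvStripBlockA lines i = pvBlockB (lines.map PySem.Str.strip) i := by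
  unfold pvStripBlockA pvBlockB
  rw [PySem.List.slice_natCast, PySem.List.slice_natCast, List.map_take, List.map_drop]

theorem pvStrip_getD (lines : List String) (k : Nat) :
    (lines.map PySem.Str.strip).getD k "" = PySem.Str.strip (lines.getD k "") := by
  simp only [List.getD_eq_getElem?_getD, List.getElem?_map]
  cases lines[k]? with
  | none => simp; decide
  | some s => simp

theorem pvExtend_eq (lines : List String) (n i j d : Nat) :
    pvExtendA lines n i j d = pvExtendB (lines.map PySem.Str.strip) n i j d := by
  fun_induction pvExtendA lines n i j d with
  | case1 d h ih =>
      rw [pvExtendB]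
      simp only [pvStrip_getD]
      rw [dif_pos h]
      exact ih
  | case2 d h =>
      rw [pvExtendB]
      simp only [pvStrip_getD]
      rw [dif_neg h]

theorem pvExtend_le (lines : List String) (n i j d : Nat) (h : j + d ≤ n) :
    j + pvExtendA lines n i j d ≤ n := by
  fun_induction pvExtendA lines n i j d with
  | case1 d hc ih => exact ih (by omega)
  | case2 d hc => exact h

-- the association-list index returns exactly the positions whose block equals the key
theorem pvIndex_getD (stripped : List String) (n : Nat) (key : List String) :
    (pvIndexB stripped n).getD key [] =
      (List.range (n - 14)).filter (fun j => pvBlockB stripped j == key) := by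
  unfold pvIndexB
  rw [PySem.Dict.getD_foldl_modify_append]
  rw [List.filter_map, List.map_map]
  simp [List.map_id_fun', Function.comp_def]

theorem pvFind_ge_filter {p : Nat → Bool} (lo : Nat) (l : List Nat) (hall : ∀ x ∈ l, lo ≤ x) :
    (l.filter p).find? (fun x => decide (lo ≤ x)) = l.find? p := by
  induction l with
  | nil => simp
  | cons a l ih =>
      have ha : lo ≤ a := hall a (List.mem_cons_self ..)
      cases hp : p a with
      | true => simp [hp, ha]
      | false =>
          simp only [List.filter_cons, hp, if_neg, Bool.false_eq_true, not_false_iff,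
            List.find?_cons_of_neg]
          exact ih (fun x hx => hall x (List.mem_cons_of_mem _ hx))

-- A's linear rescan finds the same first j as B's lookup in the position index
theorem pvFind_eq (stripped : List String) (n : Nat) (i : Nat) :
    (List.range' (i + 15) (n - 14 - (i + 15))).find?
        (fun j => pvBlockB stripped i == pvBlockB stripped j) =
      ((pvIndexB stripped n).getD (pvBlockB stripped i) []).find? (fun p => decide (i + 15 ≤ p)) := by
  rw [pvIndex_getD]
  have hpred : (fun j => pvBlockB stripped j == pvBlockB stripped i)
      = (fun j => pvBlockB stripped i == pvBlockB stripped j) := by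
    funext j
    by_cases h : pvBlockB stripped i = pvBlockB stripped j
    · simp [h]
    · simp [h, Ne.symm h]
  rw [hpred]
  by_cases hlo : i + 15 ≤ n - 14
  · have hsplit : List.range (n - 14)
        = List.range' 0 (i + 15) ++ List.range' (i + 15) (n - 14 - (i + 15)) := by
      have h : List.range' 0 (i + 15) ++ List.range' (i + 15) (n - 14 - (i + 15))
          = List.range' 0 ((i + 15) + (n - 14 - (i + 15))) := by
        have := @List.range'_append_1 0 (i + 15) (n - 14 - (i + 15))
        rwa [Nat.zero_add] at this
      rw [List.range_eq_range']
      conv_lhs => rw [show n - 14 = (i + 15) + (n - 14 - (i + 15)) by omega]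
      rw [← h]
    rw [hsplit, List.filter_append, List.find?_append]
    have h1 : (List.filter (fun j => pvBlockB stripped i == pvBlockB stripped j)
        (List.range' 0 (i + 15))).find? (fun p => decide (i + 15 ≤ p)) = none := by
      rw [List.find?_eq_none]
      intro x hx
      have := List.mem_range'.mp (List.mem_of_mem_filter hx)
      simp
      omega
    rw [h1, Option.none_or]
    exact (pvFind_ge_filter (i + 15) _ (fun x hx => by
      have := List.mem_range'.mp hx; omega)).symm
  · have h0 : n - 14 - (i + 15) = 0 := by omega
    rw [h0]
    simp only [List.range'_zero, List.find?_nil]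
    rw [eq_comm, List.find?_eq_none]
    intro x hx
    have := List.mem_range.mp (List.mem_of_mem_filter hx)
    simp
    omega

theorem pvStep_eq (lines : List String) (n : Nat) (hn : n = lines.length) (h30 : ¬ n < 30)
    (acc : PySem.Set Nat) (i : Nat) :
    pvStepA lines n acc i
      = pvStepB (lines.map PySem.Str.strip) (pvIndexB (lines.map PySem.Str.strip) n) n acc i := by
  unfold pvStepA pvStepB
  simp only [pvBlock_eq]
  rw [pvFind_eq]
  cases hf : ((pvIndexB (lines.map PySem.Str.strip) n).getD
      (pvBlockB (lines.map PySem.Str.strip) i) []).find? (fun p => decide (i + 15 ≤ p)) with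
  | none => rfl
  | some j =>
      simp only []
      -- the found j lies in the index, hence j ≤ n - 15, so min (j + dup) n = j + dup
      have hjmem : j ∈ (pvIndexB (lines.map PySem.Str.strip) n).getD
          (pvBlockB (lines.map PySem.Str.strip) i) [] := List.mem_of_find?_eq_some hf
      rw [pvIndex_getD] at hjmem
      have hj : j < n - 14 := List.mem_range.mp (List.mem_of_mem_filter hjmem)
      have hle : j + pvExtendA lines n i j 15 ≤ n := pvExtend_le lines n i j 15 (by omega)
      have hmin : min (j + pvExtendA lines n i j 15) n - j = pvExtendA lines n i j 15 := by
        omega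
      rw [hmin, pvExtend_eq, PySem.Set.update]

-- ===== VERDICT (by name: the statement is the Claim_ definition above) =====
theorem remove_large_duplicates_py_spec : Claim_equal_remove_large_duplicates_py := by
  intro lines _
  unfold Spec_remove_large_duplicates_py remove_large_duplicates_py remove_large_duplicates_py_alt
  by_cases h30 : lines.length < 30
  · simp [h30]
  · simp only [h30, if_neg, not_false_iff]
    have hstep : pvStepA lines lines.length
        = pvStepB (lines.map PySem.Str.strip) (pvIndexB (lines.map PySem.Str.strip) lines.length)
            lines.length := by
      funext acc i
      exact pvStep_eq lines lines.length rfl h30 acc i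
    rw [hstep]
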